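-- pv_equiv track=rewrite | github.com/BAODAU/whop-wss-streaming | app/listing_scraper.py | _skip_js_string
-- ===== SOURCE A (Python) =====
-- def _skip_js_string(source: str, start: int) -> int:
--     i = start + 1
--     length = len(source)
--     while i < length:
--         char = source[i]
--         if char == "\\":
--             i += 2
--             continue
--         if char == '"':
--             return i
--         i += 1
--     return length - 1
-- ===== SOURCE B (Python) =====
-- def _skip_js_string(source: str, start: int) -> int:
--     n = len(source)
--     i = start + 1
--     while i < n:
--         b = source.find("\\", i)
--         q = source.find('"', i)
--         if q != -1 and (b == -1 or q < b):
--             return q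
--         if b == -1:
--             return n - 1
--         i = b + 2
--     return n - 1
-- ===== Notes on version B (the rewrite author's own statement) =====
-- stated objective: faster
-- what changed: A's per-character while loop is replaced by jump-scanning: each iteration uses str.find to locate the next backslash and the next unescaped-quote candidate and either returns the quote index or jumps past the escape, so the Python-level loop runs once per escape instead of once per character.
-- outside the precondition, e.g. on _skip_js_string('a"c', -4): A returns -2, B returns 1; on _skip_js_string('xyz', -3): A returns 2, B returns 2
import Mathlib
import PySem

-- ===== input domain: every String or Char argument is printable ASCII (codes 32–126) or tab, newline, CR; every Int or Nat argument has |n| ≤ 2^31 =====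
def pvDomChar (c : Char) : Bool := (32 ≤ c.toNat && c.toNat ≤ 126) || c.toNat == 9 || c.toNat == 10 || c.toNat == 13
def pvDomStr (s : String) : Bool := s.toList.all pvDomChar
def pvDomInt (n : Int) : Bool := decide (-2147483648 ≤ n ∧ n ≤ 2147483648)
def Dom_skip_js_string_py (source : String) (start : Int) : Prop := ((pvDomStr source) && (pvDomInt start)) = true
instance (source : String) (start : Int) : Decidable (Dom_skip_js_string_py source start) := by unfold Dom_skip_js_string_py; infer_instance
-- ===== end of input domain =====

-- B replaces A's char-by-char scan with str.find jumps between the next backslash and the next quote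
-- (C-level scanning in Python); equivalence of the RETURN value is proved for start ≥ -1.

-- ===== PORT A =====
-- A's while loop as structural recursion on i; the `none` arm is Python's IndexError (excluded by Pre_)
def skipJsGoA (cs : List Char) (length : Int) (i : Int) : Int :=
  if _h : i < length then
    match PySem.List.pyGet? cs i with
    | none => 0
    | some c =>
      if c = '\\' then skipJsGoA cs length (i + 2)
      else if c = '"' then i
      else skipJsGoA cs length (i + 1)
  else length - 1
termination_by (length - i).toNat
decreasing_by all_goals omega

def skip_js_string_py (source : String) (start : Int) : Int :=
  skipJsGoA source.toList (PySem.List.len source.toList) (start + 1)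

-- ===== PORT B =====
-- Source B's while loop: find the next backslash b and next quote q from i, return q if it comes first,
-- otherwise jump to b + 2.  `max (b + 2) (i + 1)` is only a termination guard: whenever that branch
-- is reached, b ≥ i - 1, so the value recursed on is b + 2, exactly as in Source B.
def skipJsGoB (cs : List Char) (n : Int) (i : Int) : Int :=
  if _h : i < n then
    let b := PySem.Chars.findFrom cs ['\\'] i
    let q := PySem.Chars.findFrom cs ['"'] i
    if q ≠ -1 ∧ (b = -1 ∨ q < b) then q
    else if b = -1 then n - 1
    else skipJsGoB cs n (max (b + 2) (i + 1))
  else n - 1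
termination_by (n - i).toNat
decreasing_by omega

def skip_js_string_py_alt (source : String) (start : Int) : Int :=
  skipJsGoB source.toList (PySem.List.len source.toList) (start + 1)

-- ===== PRECONDITION & SPEC =====
-- Pre_ excludes start < -1, outside the scanner's natural domain (start is the index of the opening
-- quote): there Python's negative indexing makes A raise IndexError (start + 1 < -len) or scan
-- end-relative with an accidental wraparound re-scan, possibly returning a negative index.
def Pre_skip_js_string_py (source : String) (start : Int) : Prop := -1 ≤ start
instance (source : String) (start : Int) : Decidable (Pre_skip_js_string_py source start) := by unfold Pre_skip_js_string_py; infer_instance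

def pvWitness_skip_js_string_py : String × Int := ("ab\\\"c\"x", 0)

def Spec_skip_js_string_py (source : String) (start : Int) (out : Int) : Prop := out = skip_js_string_py_alt source start
instance (source : String) (start : Int) (out : Int) : Decidable (Spec_skip_js_string_py source start out) := by unfold Spec_skip_js_string_py; infer_instance

-- ===== CLAIM (what is proved, stated in full; the proofs are below) =====
def Claim_equal_skip_js_string_py : Prop := ∀ (source : String) (start : Int), Dom_skip_js_string_py source start → Pre_skip_js_string_py source start → Spec_skip_js_string_py source start (skip_js_string_py source start)
-- ===== LEMMAS AND PROOFS =====


-- [c] is a prefix of l iff l starts with c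
theorem pvSingletonPrefix (c : Char) (l : List Char) : [c] <+: l ↔ l[0]? = some c := by
  cases l with
  | nil => simp
  | cons a t => simp [List.cons_prefix_cons, eq_comm]

-- [c] occurs in l iff c ∈ l
theorem pvSingletonInfix (c : Char) (l : List Char) : [c] <:+: l ↔ c ∈ l := by
  constructor
  · intro h; exact h.sublist.subset (List.mem_singleton_self c)
  · intro h
    obtain ⟨s, t, rfl⟩ := List.append_of_mem h
    exact ⟨s, t, by simp⟩

-- find from i returned -1: no occurrence of c at any j ≥ i
theorem pvFFnone (cs : List Char) (c : Char) (i : Nat) (hi : i ≤ cs.length)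
    (h : PySem.Chars.findFrom cs [c] (i : Int) = -1) :
    ∀ j : Nat, i ≤ j → cs[j]? ≠ some c := by
  intro j hij hcj
  have hnin := (PySem.Chars.findFrom_natCast_eq_neg_one_iff cs [c] i hi).mp h
  apply hnin
  rw [pvSingletonInfix]
  have : (cs.drop i)[j - i]? = some c := by
    rw [List.getElem?_drop]
    rwa [Nat.add_sub_cancel' hij]
  exact List.mem_of_getElem? this

-- find from i returned ≠ -1: it is the first occurrence index m ≥ i
theorem pvFFsome (cs : List Char) (c : Char) (i : Nat) (hi : i ≤ cs.length)
    (h : PySem.Chars.findFrom cs [c] (i : Int) ≠ -1) :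
    ∃ m : Nat, PySem.Chars.findFrom cs [c] (i : Int) = (m : Int) ∧ i ≤ m ∧ m < cs.length ∧
      cs[m]? = some c ∧ ∀ j : Nat, i ≤ j → j < m → cs[j]? ≠ some c := by
  obtain ⟨hle, hpfx, hfirst⟩ := PySem.Chars.findFrom_natCast_spec cs [c] i hi h
  set F := PySem.Chars.findFrom cs [c] (i : Int) with hF
  have h0 : 0 ≤ F := le_trans (by exact_mod_cast Nat.zero_le i) hle
  refine ⟨F.toNat, by omega, by omega, ?_, ?_, ?_⟩
  · have := (pvSingletonPrefix c (cs.drop F.toNat)).mp hpfx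
    rw [List.getElem?_drop] at this
    by_contra hnot
    push_neg at hnot
    have : F.toNat < cs.length := by
      by_contra hge
      push_neg at hge
      have : cs[F.toNat + 0]? = none := by
        rw [List.getElem?_eq_none_iff]; omega
      simp_all
    omega
  · have := (pvSingletonPrefix c (cs.drop F.toNat)).mp hpfx
    rwa [List.getElem?_drop, Nat.add_zero] at this
  · intro j hij hjm hcj
    apply hfirst j hij hjm
    rw [pvSingletonPrefix, List.getElem?_drop, Nat.add_zero]
    exact hcj

-- A's scan walks unchanged over a stretch with no quote and no backslash
theorem pvWalk (cs : List Char) (k : Nat) (hk : k ≤ cs.length) (i : Nat) (h1 : i ≤ k)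
    (hplain : ∀ j : Nat, i ≤ j → j < k → cs[j]? ≠ some '\\' ∧ cs[j]? ≠ some '"') :
    skipJsGoA cs (PySem.List.len cs) (i : Int) = skipJsGoA cs (PySem.List.len cs) (k : Int) := by
  by_cases hik : i < k
  · have hiL : i < cs.length := by omega
    have step : skipJsGoA cs (PySem.List.len cs) (i : Int)
        = skipJsGoA cs (PySem.List.len cs) ((i : Int) + 1) := by
      rw [skipJsGoA]
      have hcond : ((i : Int) < PySem.List.len cs) := by
        rw [PySem.List.len_eq]; exact_mod_cast hiL
      rw [dif_pos hcond]
      have hget : PySem.List.pyGet? cs (i : Int) = some cs[i] := by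
        simp [List.getElem?_eq_getElem hiL]
      rw [hget]
      show (if cs[i] = '\\' then skipJsGoA cs (PySem.List.len cs) ((i : Int) + 2)
            else if cs[i] = '"' then (i : Int)
            else skipJsGoA cs (PySem.List.len cs) ((i : Int) + 1))
          = skipJsGoA cs (PySem.List.len cs) ((i : Int) + 1)
      obtain ⟨hnb, hnq⟩ := hplain i le_rfl hik
      rw [List.getElem?_eq_getElem hiL] at hnb hnq
      rw [if_neg (by simpa using hnb), if_neg (by simpa using hnq)]
    rw [step]
    have hc : ((i : Int) + 1) = ((i + 1 : Nat) : Int) := by push_cast; ring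
    rw [hc]
    exact pvWalk cs k hk (i + 1) (by omega) (fun j hj1 hj2 => hplain j (by omega) hj2)
  · have : i = k := by omega
    rw [this]
termination_by k - i

theorem skipJs_main (cs : List Char) (i : Nat) :
    skipJsGoA cs (PySem.List.len cs) (i : Int) = skipJsGoB cs (PySem.List.len cs) (i : Int) := by
  have hlen : PySem.List.len cs = (cs.length : Int) := by simp [PySem.List.len_eq]
  by_cases hin : i < cs.length
  case neg =>
    rw [skipJsGoA, skipJsGoB, hlen]
    rw [dif_neg (by exact_mod_cast hin), dif_neg (by exact_mod_cast hin)]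
  case pos =>
  have hiL : i ≤ cs.length := le_of_lt hin
  rw [skipJsGoB]
  rw [dif_pos (by rw [hlen]; exact_mod_cast hin)]
  by_cases hq : PySem.Chars.findFrom cs ['"'] (i : Int) ≠ -1 ∧
      (PySem.Chars.findFrom cs ['\\'] (i : Int) = -1 ∨
       PySem.Chars.findFrom cs ['"'] (i : Int) < PySem.Chars.findFrom cs ['\\'] (i : Int))
  · rw [if_pos hq]
    obtain ⟨hqne, hbor⟩ := hq
    obtain ⟨m, hFm, him, hmL, hcm, hfirst⟩ := pvFFsome cs '"' i hiL hqne
    have hnb : ∀ j : Nat, i ≤ j → j < m → cs[j]? ≠ some '\\' := by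
      rcases hbor with hb1 | hb2
      · intro j hj1 _; exact pvFFnone cs '\\' i hiL hb1 j hj1
      · obtain ⟨mb, hFmb, himb, hmbL, hcmb, hfb⟩ :=
          pvFFsome cs '\\' i hiL (by intro hc; rw [hc] at hb2; omega)
        have hmmb : m < mb := by rw [hFm, hFmb] at hb2; exact_mod_cast hb2
        intro j hj1 hj2; exact hfb j hj1 (by omega)
    rw [pvWalk cs m (le_of_lt hmL) i him
      (fun j hj1 hj2 => ⟨hnb j hj1 hj2, hfirst j hj1 hj2⟩)]
    rw [skipJsGoA]
    rw [dif_pos (by rw [hlen]; exact_mod_cast hmL)]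
    have hget : PySem.List.pyGet? cs (m : Int) = some '"' := by
      simpa using hcm
    rw [hget, hFm]
    show (if ('"' : Char) = '\\' then skipJsGoA cs (PySem.List.len cs) ((m : Int) + 2)
          else if ('"' : Char) = '"' then (m : Int)
          else skipJsGoA cs (PySem.List.len cs) ((m : Int) + 1))
        = (m : Int)
    rw [if_neg (by decide), if_pos rfl]
  · rw [if_neg hq]
    by_cases hb : PySem.Chars.findFrom cs ['\\'] (i : Int) = -1
    · rw [if_pos hb]
      have hq1 : PySem.Chars.findFrom cs ['"'] (i : Int) = -1 := by
        by_contra hq2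
        exact hq ⟨hq2, Or.inl hb⟩
      have hplain : ∀ j : Nat, i ≤ j → j < cs.length →
          cs[j]? ≠ some '\\' ∧ cs[j]? ≠ some '"' :=
        fun j hj1 _ => ⟨pvFFnone cs '\\' i hiL hb j hj1, pvFFnone cs '"' i hiL hq1 j hj1⟩
      rw [pvWalk cs cs.length le_rfl i hiL hplain]
      rw [skipJsGoA, dif_neg (by rw [hlen]; omega), hlen]
    · rw [if_neg hb]
      obtain ⟨mb, hFmb, himb, hmbL, hcmb, hfb⟩ := pvFFsome cs '\\' i hiL hb
      have hnq : ∀ j : Nat, i ≤ j → j < mb → cs[j]? ≠ some '"' := by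
        by_cases hq1 : PySem.Chars.findFrom cs ['"'] (i : Int) = -1
        · intro j hj1 _; exact pvFFnone cs '"' i hiL hq1 j hj1
        · obtain ⟨mq, hFmq, himq, hmqL, hcmq, hfq⟩ := pvFFsome cs '"' i hiL hq1
          have hble : mb ≤ mq := by
            have : ¬ (PySem.Chars.findFrom cs ['"'] (i : Int) <
                PySem.Chars.findFrom cs ['\\'] (i : Int)) := fun hc => hq ⟨hq1, Or.inr hc⟩
            rw [hFmq, hFmb] at this
            exact_mod_cast not_lt.mp this
          have hbne : mb ≠ mq := by
            intro he; rw [he, hcmq] at hcmb; simp at hcmb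
          intro j hj1 hj2; exact hfq j hj1 (by omega)
      rw [pvWalk cs mb (le_of_lt hmbL) i himb
        (fun j hj1 hj2 => ⟨hfb j hj1 hj2, hnq j hj1 hj2⟩)]
      rw [skipJsGoA]
      rw [dif_pos (by rw [hlen]; exact_mod_cast hmbL)]
      have hget : PySem.List.pyGet? cs (mb : Int) = some '\\' := by
        simpa using hcmb
      rw [hget]
      show (if ('\\' : Char) = '\\' then skipJsGoA cs (PySem.List.len cs) ((mb : Int) + 2)
            else if ('\\' : Char) = '"' then (mb : Int)
            else skipJsGoA cs (PySem.List.len cs) ((mb : Int) + 1))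
          = skipJsGoB cs (PySem.List.len cs)
              (max (PySem.Chars.findFrom cs ['\\'] (i : Int) + 2) ((i : Int) + 1))
      rw [if_pos rfl]
      have hmax : max (PySem.Chars.findFrom cs ['\\'] (i : Int) + 2) ((i : Int) + 1)
          = ((mb + 2 : Nat) : Int) := by
        rw [hFmb]; push_cast; omega
      have hc2 : ((mb : Int) + 2) = ((mb + 2 : Nat) : Int) := by push_cast; ring
      rw [hmax, hc2]
      exact skipJs_main cs (mb + 2)
termination_by cs.length - i
decreasing_by omega

-- ===== VERDICT (by name: the statement is the Claim_ definition above) =====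
theorem skip_js_string_py_spec : Claim_equal_skip_js_string_py := by
  intro source start _hdom hpre
  unfold Spec_skip_js_string_py skip_js_string_py skip_js_string_py_alt
  have h0 : (0:Int) ≤ start + 1 := by unfold Pre_skip_js_string_py at hpre; omega
  have : start + 1 = ((start + 1).toNat : Int) := by omega
  rw [this]
  exact skipJs_main source.toList (start + 1).toNat
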